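-- pv_equiv track=rewrite | github.com/daniel-reich/ubiquitous-fiesta | WS6hR6b9EZzuDTD26_10.py | no_duplicate_letters
-- ===== SOURCE A (Python) =====
-- from collections import Counter
--
-- def no_duplicate_letters(phrase):
--   lst = phrase.split(" ")
--
--   for word in lst:
--     a = Counter([char for char in word])
--     for key in list(a.keys()):
--       if a[key] > 1:
--         return False
--
--   return True
-- ===== SOURCE B (Python) =====
-- def no_duplicate_letters(phrase):
--   seen = set()
--   for ch in phrase:
--     if ch == " ":
--       seen = set()
--     elif ch in seen:
--       return False
--     else:
--       seen.add(ch)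
--   return True
-- ===== Notes on version B (the rewrite author's own statement) =====
-- stated objective: alternative
-- what changed: Replaced A's two-level loop (split the phrase, build a Counter per word, scan the counter keys for a count > 1) with a single streaming scan over the characters of the whole phrase that keeps a seen-set, resets it at each space, and fails the instant a character repeats within the current word; no split and no per-word histogram are ever built. B is also faster in practice: it exits the moment a repeat appears and allocates no per-word Counter/list objects.
import Mathlib
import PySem

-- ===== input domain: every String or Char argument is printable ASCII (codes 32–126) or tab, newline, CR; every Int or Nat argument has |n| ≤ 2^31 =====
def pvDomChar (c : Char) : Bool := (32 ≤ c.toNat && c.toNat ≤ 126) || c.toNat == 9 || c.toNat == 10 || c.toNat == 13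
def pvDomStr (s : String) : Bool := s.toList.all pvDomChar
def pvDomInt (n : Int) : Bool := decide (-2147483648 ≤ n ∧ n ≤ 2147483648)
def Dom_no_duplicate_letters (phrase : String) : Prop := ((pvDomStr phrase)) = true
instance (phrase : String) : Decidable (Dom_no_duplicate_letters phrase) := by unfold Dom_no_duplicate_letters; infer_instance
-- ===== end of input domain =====

-- B replaces A's two-level loop (split, per-word Counter, key scan) by one streaming
-- character scan with a seen-set reset at each space (alternative decomposition).

-- ===== PORT A =====
-- inner loop: 'for key in list(a.keys()): if a[key] > 1: return False' (true = found a duplicate)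
def pvInnerA (a : PySem.Dict Char Int) : List Char → Bool
  | [] => false
  | k :: ks => if a.getD k 0 > 1 then true else pvInnerA a ks

-- outer loop over the words with early return False
def pvOuterA : List String → Bool
  | [] => true
  | w :: ws =>
    let a := PySem.Dict.counter w.toList
    if pvInnerA a a.keys then false else pvOuterA ws

-- phrase.split(" "): sep is the nonempty literal " ", so split? is always `some`
def no_duplicate_letters (phrase : String) : Bool :=
  pvOuterA ((PySem.Str.split? phrase " ").getD [])

-- ===== PORT B =====
-- 'for ch in phrase: if ch == " ": seen = set() elif ch in seen: return False else: seen.add(ch)'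
def pvScanB (seen : PySem.Set Char) : List Char → Bool
  | [] => true
  | c :: cs =>
    if c = ' ' then pvScanB (PySem.Set.ofList []) cs
    else if PySem.Set.contains seen c then false
    else pvScanB (PySem.Set.add seen c) cs

def no_duplicate_letters_alt (phrase : String) : Bool :=
  pvScanB (PySem.Set.ofList []) phrase.toList

-- ===== PRECONDITION & SPEC =====
def Spec_no_duplicate_letters (phrase : String) (out : Bool) : Prop := out = no_duplicate_letters_alt phrase
instance (phrase : String) (out : Bool) : Decidable (Spec_no_duplicate_letters phrase out) := by unfold Spec_no_duplicate_letters; infer_instance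

-- ===== CLAIM (what is proved, stated in full; the proofs are below) =====
def Claim_equal_no_duplicate_letters : Prop := ∀ (phrase : String), Dom_no_duplicate_letters phrase → Spec_no_duplicate_letters phrase (no_duplicate_letters phrase)

-- ===== LEMMAS AND PROOFS =====

-- reference split of a character list on single spaces (always nonempty)
def pvSplitSp : List Char → List (List Char)
  | [] => [[]]
  | c :: cs =>
    if c = ' ' then [] :: pvSplitSp cs
    else
      match pvSplitSp cs with
      | [] => [[c]]
      | w :: ws => (c :: w) :: ws

lemma pvSplitSp_ne_nil (cs : List Char) : pvSplitSp cs ≠ [] := by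
  cases cs with
  | nil => simp [pvSplitSp]
  | cons c cs =>
    simp only [pvSplitSp]
    split_ifs
    · simp
    · cases h : pvSplitSp cs <;> simp

-- splitOn.go with enough fuel computes pvSplitSp (sep = " ")
lemma go_spec (fuel : Nat) (l cur : List Char) (acc : List (List Char)) (h : l.length ≤ fuel) :
    PySem.Chars.splitOn.go [' '] fuel l cur acc
      = acc.reverse ++
        (match pvSplitSp l with
         | [] => [cur.reverse]
         | w :: ws => (cur.reverse ++ w) :: ws) := by
  induction fuel generalizing l cur acc with
  | zero =>
    have : l = [] := List.length_eq_zero_iff.mp (Nat.le_zero.mp h)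
    subst this
    simp [PySem.Chars.splitOn.go, pvSplitSp]
  | succ fuel ih =>
    cases l with
    | nil => simp [PySem.Chars.splitOn.go, pvSplitSp]
    | cons c rest =>
      simp only [PySem.Chars.splitOn.go]
      by_cases hc : c = ' '
      · subst hc
        have hp : [' '].isPrefixOf (' ' :: rest) = true := by simp [List.isPrefixOf]
        rw [if_pos hp]
        simp only [List.length, List.drop_succ_cons, List.drop_zero] at *
        rw [ih rest [] (List.reverse cur :: acc) (by omega)]
        simp only [pvSplitSp]
        cases hs : pvSplitSp rest with
        | nil => exact absurd hs (pvSplitSp_ne_nil rest)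
        | cons w ws => simp
      · have hp : [' '].isPrefixOf (c :: rest) = false := by
          simp [List.isPrefixOf]
          exact Ne.symm hc
        rw [if_neg (by simp [hp])]
        rw [ih rest (c :: cur) acc (by simp at h ⊢; omega)]
        simp only [pvSplitSp, if_neg hc]
        cases hs : pvSplitSp rest with
        | nil => exact absurd hs (pvSplitSp_ne_nil rest)
        | cons w ws => simp

lemma splitOn_space (cs : List Char) :
    PySem.Chars.splitOn cs [' '] = pvSplitSp cs := by
  unfold PySem.Chars.splitOn
  rw [go_spec (cs.length + 1) cs [] [] (by omega)]
  cases hs : pvSplitSp cs with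
  | nil => exact absurd hs (pvSplitSp_ne_nil cs)
  | cons w ws => simp

-- ===== A-side: each word's Counter test is the Nodup test =====

lemma pvInnerA_eq_any (a : PySem.Dict Char Int) (ks : List Char) :
    pvInnerA a ks = ks.any (fun k => a.getD k 0 > 1) := by
  induction ks with
  | nil => rfl
  | cons k ks ih =>
    simp only [pvInnerA, List.any_cons, ih]
    split_ifs with h <;> simp [h]

lemma word_lemma (cs : List Char) :
    pvInnerA (PySem.Dict.counter cs) (PySem.Dict.counter cs).keys = !decide cs.Nodup := by
  rw [pvInnerA_eq_any, PySem.Dict.keys_counter]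
  by_cases h : cs.Nodup
  · simp only [h, decide_true, Bool.not_true]
    rw [List.any_eq_false]
    intro k _
    rw [PySem.Dict.getD_counter]
    have := List.nodup_iff_count_le_one.mp h k
    simp
    omega
  · obtain ⟨k, hk⟩ : ∃ k, 1 < cs.count k := by
      by_contra hc
      exact h (List.nodup_iff_count_le_one.mpr
        (fun a => Nat.le_of_not_lt (fun hlt => hc ⟨a, hlt⟩)))
    have hmem : k ∈ cs := by rw [← List.count_pos_iff]; omega
    have hany : (PySem.Set.ofList cs).any (fun k => (PySem.Dict.counter cs).getD k 0 > 1) = true := by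
      rw [List.any_eq_true]
      exact ⟨k, (PySem.Set.mem_ofList _ _).mpr hmem, by
        rw [PySem.Dict.getD_counter]; simp; exact_mod_cast hk⟩
    rw [hany]
    simp [h]

lemma outer_eq_all (ws : List String) :
    pvOuterA ws = ws.all (fun w => decide w.toList.Nodup) := by
  induction ws with
  | nil => rfl
  | cons w ws ih =>
    simp only [pvOuterA, word_lemma, List.all_cons, ih]
    by_cases h : w.toList.Nodup <;> simp [h]

-- ===== B-side: the streaming scan checks Nodup of each pvSplitSp word =====

lemma scan_spec (cs : List Char) (seen : PySem.Set Char) (hs : seen.Nodup) :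
    pvScanB seen cs
      = ((match pvSplitSp cs with
          | [] => true
          | w :: ws => decide ((seen ++ w).Nodup) && ws.all (fun w => decide w.Nodup))) := by
  induction cs generalizing seen with
  | nil => simp [pvScanB, pvSplitSp, hs]
  | cons c rest ih =>
    simp only [pvScanB]
    by_cases hc : c = ' '
    · subst hc
      rw [if_pos rfl, ih _ (by simp [PySem.Set.ofList])]
      have hsp : pvSplitSp (' ' :: rest) = [] :: pvSplitSp rest := by
        simp [pvSplitSp]
      rw [hsp]
      cases hr : pvSplitSp rest with
      | nil => exact absurd hr (pvSplitSp_ne_nil rest)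
      | cons w ws =>
        simp [hs, PySem.Set.ofList]
        rfl
    · rw [if_neg hc]
      simp only [pvSplitSp, if_neg hc]
      by_cases hmem : c ∈ seen
      · have : PySem.Set.contains seen c = true := by
          simp [PySem.Set.contains, hmem]
        rw [if_pos this]
        cases hr : pvSplitSp rest with
        | nil => exact absurd hr (pvSplitSp_ne_nil rest)
        | cons w ws =>
          have : ¬ (seen ++ c :: w).Nodup := by
            intro hnd
            have := List.disjoint_of_nodup_append hnd
            exact this hmem (by simp)
          simp [this]
      · have hcon : PySem.Set.contains seen c = false := by
          simp [PySem.Set.contains, hmem]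
        rw [if_neg (by simp [PySem.Set.contains]; exact hmem)]
        have hadd : PySem.Set.add seen c = seen ++ [c] := by
          simp [PySem.Set.add, List.contains_eq_mem, hmem]
        rw [hadd] at *
        have hnd : (seen ++ [c]).Nodup := by
          simp [List.nodup_append, hs]
          intro a ha h
          exact hmem (h ▸ ha)
        rw [ih _ hnd]
        cases hr : pvSplitSp rest with
        | nil => exact absurd hr (pvSplitSp_ne_nil rest)
        | cons w ws => simp

-- ===== VERDICT (by name: the statement is the Claim_ definition above) =====
theorem no_duplicate_letters_spec : Claim_equal_no_duplicate_letters := by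
  intro phrase _
  unfold Spec_no_duplicate_letters no_duplicate_letters no_duplicate_letters_alt
  -- bridge the string split to the char split
  have hsplit := PySem.Str.split?_map phrase " "
  have hsep : (" " : String).toList = [' '] := rfl
  rw [hsep] at hsplit
  rw [PySem.Chars.split?] at hsplit
  simp only [List.isEmpty_cons] at hsplit
  cases hws : PySem.Str.split? phrase " " with
  | none => rw [hws] at hsplit; simp at hsplit
  | some ws =>
    rw [hws] at hsplit
    simp only [Option.map_some] at hsplit
    have hmap : ws.map String.toList = PySem.Chars.splitOn phrase.toList [' '] := by
      injection hsplit
    rw [Option.getD_some, outer_eq_all]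
    rw [scan_spec phrase.toList (PySem.Set.ofList []) (by simp [PySem.Set.ofList])]
    have hall : ws.all (fun w => decide w.toList.Nodup)
        = (ws.map String.toList).all (fun w => decide w.Nodup) := by
      rw [List.all_map]; rfl
    rw [hall, hmap, splitOn_space]
    cases hr : pvSplitSp phrase.toList with
    | nil => exact absurd hr (pvSplitSp_ne_nil phrase.toList)
    | cons w ws' => rfl
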